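"""PySem's core primitives (data/PySemCore.lean) against CPython: every primitive evaluated in Lean
on a grid of edge inputs must equal what the Python built-in it names
returns, or be 'none' exactly where Python raises. Opt in with PV_PYSEM=1;
needs a Lean 4 toolchain on the box (PV_PYSEM_LEAN=<path to lean>, default
'lean' on PATH). PySem imports nothing beyond core Lean, so no Mathlib is
needed. CPython here is the reference semantics (3.13)."""

import os
import shutil
import subprocess
import tempfile
from pathlib import Path

import pytest

pytestmark = pytest.mark.skipif(
    os.environ.get("PV_PYSEM") != "1",
    reason="PV_PYSEM=1 not set (needs a Lean toolchain)",
)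

PYSEM = (
    Path(__file__).resolve().parents[1]
    / "moroder"
    / "envs"
    / "pv_equiv"
    / "data"
    / "PySemCore.lean"
)
HARNESS = Path(__file__).resolve().parent / "pv_equiv_pysem_harness.py"
TRANSPARENT = Path(__file__).resolve().parent / "pv_pysem_transparent.lean"


def test_pysem_agrees_with_cpython() -> None:
    lean = os.environ.get("PV_PYSEM_LEAN") or shutil.which("lean")
    assert lean, "no lean binary (set PV_PYSEM_LEAN)"
    with tempfile.TemporaryDirectory() as d:
        shutil.copy(PYSEM, Path(d) / "PySemCore.lean")
        r = subprocess.run(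
            [lean, "-o", "PySemCore.olean", "PySemCore.lean"],
            cwd=d,
            capture_output=True,
            text=True,
            timeout=900,
        )
        assert r.returncode == 0 and "sorry" not in r.stdout, (
            r.stdout[-2000:] + r.stderr[-2000:]
        )
        h = subprocess.run(
            ["python3", str(HARNESS), d, lean],
            capture_output=True,
            text=True,
            timeout=2400,
        )
        last = [ln for ln in h.stdout.splitlines() if ln.startswith("SUMMARY")]
        assert last and " 0 mismatches" in last[-1] and "rc=0" in last[-1], (
            h.stdout[-4000:] + h.stderr[-2000:]
        )
        n_cases, n_eval = int(last[-1].split()[1]), int(last[-1].split()[3])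
        assert n_cases == n_eval >= 8000, last[
            -1
        ]  # the whole grid ran (a generator regression must not pass vacuously)
        # kernel transparency: every primitive family reduces by decide/rfl on a literal and trivial lemmas close by ordinary tactics
        shutil.copy(TRANSPARENT, Path(d) / "Transparent.lean")
        t = subprocess.run(
            [lean, "Transparent.lean"],
            cwd=d,
            capture_output=True,
            text=True,
            timeout=900,
            env={
                **os.environ,
                "LEAN_PATH": d
                + os.pathsep
                + subprocess.run(
                    [lean, "--print-libdir"], capture_output=True, text=True, check=True
                ).stdout.strip(),
            },
        )
        assert t.returncode == 0 and "error" not in t.stdout, (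
            t.stdout[-3000:] + t.stderr[-1000:]
        )
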